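-- pv_equiv track=rewrite | github.com/jmaarleveld/automata | automata/pdm/cfg.py | _collect_generated
-- ===== SOURCE A (Python) =====
-- def _collect_generated(nonterminals, terminals, rules, start):
--     generated = {start}
--     while True:
--         prev = generated.copy()
--         generated |= {x
--                       for x in ((nonterminals | terminals) - generated)
--                       for a, w in rules
--                       if a in generated and w.count(x) >= 1}
--         if prev == generated:
--             break
--     return generated
-- ===== SOURCE B (Python) =====
-- def _collect_generated(nonterminals, terminals, rules, start):
--     # Worklist/frontier algorithm: rules are indexed by LHS once; each rule's RHS
--     # is tested against a still-ungenerated candidate at most once after its LHS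
--     # becomes generated, instead of re-scanning all rules for all symbols per round.
--     index = {}
--     for a, w in rules:
--         index.setdefault(a, []).append(w)
--     generated = {start}
--     remaining = [x for x in dict.fromkeys(list(nonterminals) + list(terminals))
--                  if x not in generated]
--     frontier = [start]
--     while frontier:
--         active = [w for a in frontier for w in index.get(a, [])]
--         new = [x for x in remaining if any(x in w for w in active)]
--         generated.update(new)
--         remaining = [x for x in remaining if x not in generated]
--         frontier = new
--     return generated
-- ===== Notes on version B (the rewrite author's own statement) =====
-- stated objective: faster
-- what changed: A recomputes, in every fixpoint round, the whole candidate set (N|T)-generated and rescans the full rule list (with a full substring count) for every candidate; B indexes the rules by their left-hand side once and runs a frontier/worklist loop, so each round only tests the still-ungenerated candidates against the RHSs of rules whose LHS was newly generated, i.e. each rule's RHS is tested against a candidate at most once after activation.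
import Mathlib
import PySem

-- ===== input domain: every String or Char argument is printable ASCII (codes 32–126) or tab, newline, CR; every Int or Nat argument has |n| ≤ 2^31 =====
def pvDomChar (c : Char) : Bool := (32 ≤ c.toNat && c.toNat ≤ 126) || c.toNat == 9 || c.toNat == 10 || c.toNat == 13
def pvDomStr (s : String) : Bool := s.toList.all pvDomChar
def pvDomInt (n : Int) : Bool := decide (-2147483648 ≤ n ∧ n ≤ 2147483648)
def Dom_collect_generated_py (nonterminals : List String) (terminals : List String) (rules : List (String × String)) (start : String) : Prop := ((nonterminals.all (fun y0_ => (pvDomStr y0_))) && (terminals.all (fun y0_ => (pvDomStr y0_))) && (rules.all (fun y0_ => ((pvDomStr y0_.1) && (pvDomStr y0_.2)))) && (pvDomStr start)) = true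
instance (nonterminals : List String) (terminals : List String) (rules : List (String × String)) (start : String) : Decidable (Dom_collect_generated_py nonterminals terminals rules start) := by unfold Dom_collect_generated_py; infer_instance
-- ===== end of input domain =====

-- B replaces A's repeated full rescans (every round: every candidate symbol against every
-- rule) by a frontier/worklist algorithm with the rules indexed by their left-hand side,
-- so a rule's RHS is tested against a still-ungenerated candidate at most once after the
-- rule's LHS becomes generated (objective: faster).

-- ===== PORT A =====
-- the set comprehension {x for x in D for (a, w) in rules if a in generated and w.count(x) >= 1}
def pvNewA (rules : List (String × String)) (g : PySem.Set String) (D : List String) : PySem.Set String :=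
  D.foldl (fun s x => rules.foldl
    (fun s p => if PySem.Set.contains g p.1 && decide (1 ≤ PySem.Str.count p.2 x) then PySem.Set.add s x else s) s)
    PySem.Set.empty

-- membership bound cited by pvLoopA's termination proof
theorem pvMemInner (rules : List (String × String)) (g : PySem.Set String) (x y : String) :
    ∀ s : PySem.Set String,
      y ∈ rules.foldl (fun s p => if PySem.Set.contains g p.1 && decide (1 ≤ PySem.Str.count p.2 x) then PySem.Set.add s x else s) s →
      y ∈ s ∨ y = x := by
  induction rules with
  | nil => intro s h; exact Or.inl h
  | cons r rs ih =>
    intro s h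
    rw [List.foldl_cons] at h
    rcases ih _ h with h' | h'
    · by_cases hc : (PySem.Set.contains g r.1 && decide (1 ≤ PySem.Str.count r.2 x)) = true
      · rw [if_pos hc] at h'
        exact (PySem.Set.mem_add _ _ _).1 h'
      · rw [if_neg hc] at h'
        exact Or.inl h'
    · exact Or.inr h'

theorem pvMemNewA (rules : List (String × String)) (g : PySem.Set String) (y : String) :
    ∀ (D : List String) (s : PySem.Set String),
      y ∈ D.foldl (fun s x => rules.foldl
        (fun s p => if PySem.Set.contains g p.1 && decide (1 ≤ PySem.Str.count p.2 x) then PySem.Set.add s x else s) s) s →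
      y ∈ s ∨ y ∈ D := by
  intro D
  induction D with
  | nil => intro s h; exact Or.inl h
  | cons x D ih =>
    intro s h
    rw [List.foldl_cons] at h
    rcases ih _ h with h' | h'
    · rcases pvMemInner rules g x y s h' with h'' | h''
      · exact Or.inl h''
      · exact Or.inr (by simp [h''])
    · exact Or.inr (List.mem_cons_of_mem _ h')

theorem pvCountPLt {α : Type} (l : List α) (p q : α → Bool)
    (hmono : ∀ y ∈ l, q y = true → p y = true) (x : α) (hx : x ∈ l)
    (hpx : p x = true) (hqx : q x = false) : l.countP q < l.countP p := by
  induction l with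
  | nil => cases hx
  | cons a l ih =>
    rw [List.countP_cons, List.countP_cons]
    rcases List.mem_cons.1 hx with rfl | hx'
    · have h1 : l.countP q ≤ l.countP p :=
        List.countP_mono_left (fun y hy => hmono y (List.mem_cons_of_mem _ hy))
      simp [hpx, hqx]
      omega
    · have h1 := ih (fun y hy => hmono y (List.mem_cons_of_mem _ hy)) hx'
      by_cases hqa : q a = true
      · simp [hqa, hmono a List.mem_cons_self hqa]
        omega
      · rw [Bool.not_eq_true] at hqa
        by_cases hpa : p a = true
        · simp [hqa, hpa]; omega
        · rw [Bool.not_eq_true] at hpa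
          simp [hqa, hpa]; omega

theorem pvLoopA_dec (N T : List String) (rules : List (String × String)) (g : PySem.Set String)
    (h : ¬ (PySem.Set.equal g (PySem.Set.union g (pvNewA rules g (PySem.Set.diff (PySem.Set.union (PySem.Set.ofList N) T) g))) = true)) :
    (PySem.Set.union (PySem.Set.ofList N) T).countP
        (fun y => !(PySem.Set.contains (PySem.Set.union g (pvNewA rules g (PySem.Set.diff (PySem.Set.union (PySem.Set.ofList N) T) g))) y))
      < (PySem.Set.union (PySem.Set.ofList N) T).countP (fun y => !(PySem.Set.contains g y)) := by
  set NT : PySem.Set String := PySem.Set.union (PySem.Set.ofList N) T with hNT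
  set new : PySem.Set String := pvNewA rules g (PySem.Set.diff NT g) with hnew
  set g' : PySem.Set String := PySem.Set.union g new with hg'
  have hsub : ∀ y : String, y ∈ g → y ∈ g' := fun y hy => (PySem.Set.mem_union g new y).2 (Or.inl hy)
  have hex : ∃ x : String, x ∈ g' ∧ x ∉ g := by
    by_contra hno
    push Not at hno
    exact h ((PySem.Set.equal_iff g g').2 (fun x => ⟨hsub x, fun hx => hno x hx⟩))
  obtain ⟨x, hxg', hxg⟩ := hex
  have hxnew : x ∈ new := by
    rcases (PySem.Set.mem_union g new x).1 hxg' with h' | h'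
    · exact absurd h' hxg
    · exact h'
  have hxNT : x ∈ NT := by
    rcases pvMemNewA rules g x (PySem.Set.diff NT g) PySem.Set.empty hxnew with h' | h'
    · cases h'
    · exact ((PySem.Set.mem_diff NT g x).1 h').1
  refine pvCountPLt NT (fun y => !(PySem.Set.contains g y)) (fun y => !(PySem.Set.contains g' y))
    (fun y _ hq => ?_) x hxNT (by simp; exact hxg) (by simp; exact hxg')
  show (!(PySem.Set.contains g y)) = true
  have hq' : (!(PySem.Set.contains g' y)) = true := hq
  cases hc : PySem.Set.contains g y
  · rfl
  · exfalso
    rw [(PySem.Set.contains_iff g' y).2 (hsub y ((PySem.Set.contains_iff g y).1 hc))] at hq'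
    simp at hq'

def pvLoopA (N T : List String) (rules : List (String × String)) (g : PySem.Set String) : PySem.Set String :=
  if PySem.Set.equal g (PySem.Set.union g (pvNewA rules g (PySem.Set.diff (PySem.Set.union (PySem.Set.ofList N) T) g)))
  then PySem.Set.union g (pvNewA rules g (PySem.Set.diff (PySem.Set.union (PySem.Set.ofList N) T) g))
  else pvLoopA N T rules (PySem.Set.union g (pvNewA rules g (PySem.Set.diff (PySem.Set.union (PySem.Set.ofList N) T) g)))
termination_by (PySem.Set.union (PySem.Set.ofList N) T).countP (fun y => !(PySem.Set.contains g y))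
decreasing_by exact pvLoopA_dec N T rules g (by assumption)

def collect_generated_py (nonterminals : List String) (terminals : List String) (rules : List (String × String)) (start : String) : List String :=
  pvLoopA nonterminals terminals rules (PySem.Set.ofList [start])

-- ===== PORT B =====
-- index: for a, w in rules: index.setdefault(a, []).append(w)
def pvIndex (rules : List (String × String)) : PySem.Dict String (List String) :=
  rules.foldl (fun d p => d.modify p.1 [] (fun x => x ++ [p.2])) PySem.Dict.empty

-- active = [w for a in frontier for w in index.get(a, [])]
def pvActive (index : PySem.Dict String (List String)) (frontier : List String) : List String :=
  frontier.flatMap (fun a => index.getD a [])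

-- new = [x for x in remaining if any(x in w for w in active)]
def pvNewB (index : PySem.Dict String (List String)) (frontier : List String) (remaining : List String) : List String :=
  remaining.filter (fun x => (pvActive index frontier).any (fun w => PySem.Str.isIn x w))

-- remaining = [x for x in remaining if x not in generated]
def pvRemaining (g : PySem.Set String) (remaining : List String) : List String :=
  remaining.filter (fun x => !(PySem.Set.contains g x))

theorem pvLoopB_dec (index : PySem.Dict String (List String)) (g : PySem.Set String)
    (remaining frontier : List String) (hf : ¬ frontier = []) :
    (pvRemaining (PySem.Set.update g (pvNewB index frontier remaining)) remaining).length
      + (pvNewB index frontier remaining).length < remaining.length + frontier.length := by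
  have h1 : (pvRemaining (PySem.Set.update g (pvNewB index frontier remaining)) remaining).length
      ≤ remaining.countP (fun x => !((pvActive index frontier).any (fun w => PySem.Str.isIn x w))) := by
    unfold pvRemaining
    rw [← List.countP_eq_length_filter]
    refine List.countP_mono_left (fun x hx h => ?_)
    have h2 : (!(PySem.Set.contains (PySem.Set.update g (pvNewB index frontier remaining)) x)) = true := h
    show (!((pvActive index frontier).any (fun w => PySem.Str.isIn x w))) = true
    cases hq : (pvActive index frontier).any (fun w => PySem.Str.isIn x w)
    · rfl
    · exfalso
      have hxnew : x ∈ pvNewB index frontier remaining := List.mem_filter.2 ⟨hx, hq⟩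
      rw [(PySem.Set.contains_iff _ x).2 ((PySem.Set.mem_update g _ x).2 (Or.inr hxnew))] at h2
      simp at h2
  have h2 : (pvNewB index frontier remaining).length
      = remaining.countP (fun x => (pvActive index frontier).any (fun w => PySem.Str.isIn x w)) := by
    unfold pvNewB
    rw [← List.countP_eq_length_filter]
  have h3 : remaining.countP (fun x => (pvActive index frontier).any (fun w => PySem.Str.isIn x w))
      + remaining.countP (fun x => !((pvActive index frontier).any (fun w => PySem.Str.isIn x w)))
      = remaining.length := by
    have h4 := List.length_eq_countP_add_countP (fun x => (pvActive index frontier).any (fun w => PySem.Str.isIn x w)) (l := remaining)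
    have h5 : remaining.countP (fun a => decide (¬((pvActive index frontier).any (fun w => PySem.Str.isIn a w)) = true))
        = remaining.countP (fun x => !((pvActive index frontier).any (fun w => PySem.Str.isIn x w))) := by
      refine List.countP_congr (fun a _ => ?_)
      cases hq : (pvActive index frontier).any (fun w => PySem.Str.isIn a w)
      · simp
      · simp
    omega
  have h6 : 0 < frontier.length := List.length_pos_of_ne_nil hf
  omega

def pvLoopB (index : PySem.Dict String (List String)) (g : PySem.Set String)
    (remaining frontier : List String) : PySem.Set String :=
  if frontier = [] then g
  else pvLoopB index (PySem.Set.update g (pvNewB index frontier remaining))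
    (pvRemaining (PySem.Set.update g (pvNewB index frontier remaining)) remaining)
    (pvNewB index frontier remaining)
termination_by remaining.length + frontier.length
decreasing_by exact pvLoopB_dec index g remaining frontier (by assumption)

def collect_generated_py_alt (nonterminals : List String) (terminals : List String) (rules : List (String × String)) (start : String) : List String :=
  pvLoopB (pvIndex rules) (PySem.Set.ofList [start])
    ((PySem.List.dedup (nonterminals ++ terminals)).filter (fun x => !(PySem.Set.contains (PySem.Set.ofList [start]) x)))
    [start]

-- ===== PRECONDITION & SPEC =====
def Spec_collect_generated_py (nonterminals : List String) (terminals : List String) (rules : List (String × String)) (start : String) (out : List String) : Prop := out = collect_generated_py_alt nonterminals terminals rules start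
instance (nonterminals : List String) (terminals : List String) (rules : List (String × String)) (start : String) (out : List String) : Decidable (Spec_collect_generated_py nonterminals terminals rules start out) := by unfold Spec_collect_generated_py; infer_instance

-- ===== CLAIM (what is proved, stated in full; the proofs are below) =====
def Claim_equal_collect_generated_py : Prop := ∀ (nonterminals : List String) (terminals : List String) (rules : List (String × String)) (start : String), Dom_collect_generated_py nonterminals terminals rules start → Spec_collect_generated_py nonterminals terminals rules start (collect_generated_py nonterminals terminals rules start)

-- ===== LEMMAS AND PROOFS =====

-- abbreviations used only by the proofs
def pvNT (N T : List String) : PySem.Set String := PySem.Set.union (PySem.Set.ofList N) T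
def pvRem (N T : List String) (g : PySem.Set String) : List String :=
  (pvNT N T).filter (fun x => !(PySem.Set.contains g x))

-- `w.count(x) >= 1` is exactly `x in w`
theorem pvCountGo (sub : List Char) (hsub : sub ≠ []) :
    ∀ (fuel : Nat) (l : List Char) (acc : Nat), l.length ≤ fuel →
      acc ≤ PySem.Chars.count.go sub fuel l acc ∧
        (PySem.Chars.count.go sub fuel l acc = acc ↔ ¬ sub <:+: l) := by
  intro fuel
  induction fuel with
  | zero =>
    intro l acc hl
    have hl0 : l = [] := List.eq_nil_of_length_eq_zero (Nat.le_zero.1 hl)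
    subst hl0
    simp [PySem.Chars.count.go, List.infix_nil, hsub]
  | succ n ih =>
    intro l acc hl
    cases l with
    | nil => simp [PySem.Chars.count.go, List.infix_nil, hsub]
    | cons h t =>
      rw [PySem.Chars.count.go]
      by_cases hp : sub.isPrefixOf (h :: t) = true
      · rw [if_pos hp]
        have hs1 : 1 ≤ sub.length := by
          cases sub with
          | nil => exact absurd rfl hsub
          | cons a s => simp
        have hlen : (List.drop sub.length (h :: t)).length ≤ n := by
          rw [List.length_drop]
          simp only [List.length_cons] at hl ⊢
          omega
        obtain ⟨hle, _⟩ := ih (List.drop sub.length (h :: t)) (acc + 1) hlen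
        refine ⟨by omega, ?_, ?_⟩
        · intro heq; omega
        · intro hni
          exact absurd (List.IsPrefix.isInfix (List.isPrefixOf_iff_prefix.1 hp)) hni
      · rw [if_neg hp]
        have hlen : t.length ≤ n := by simp only [List.length_cons] at hl; omega
        obtain ⟨hle, hiff⟩ := ih t acc hlen
        refine ⟨hle, hiff.trans ?_⟩
        rw [Bool.not_eq_true] at hp
        constructor
        · intro hni hinf
          rcases List.infix_cons_iff.1 hinf with h' | h'
          · exact absurd (List.isPrefixOf_iff_prefix.2 h') (by simp [hp])
          · exact hni h'
        · intro hni h'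
          exact hni (List.infix_cons_iff.2 (Or.inr h'))

theorem pvCountPos (s sub : List Char) : (1 ≤ PySem.Chars.count s sub) ↔ sub <:+: s := by
  by_cases h : sub = []
  · subst h
    simp [PySem.Chars.count, List.nil_infix]
  · have hne : sub.isEmpty = false := by simpa [List.isEmpty_iff] using h
    rw [PySem.Chars.count, hne]
    simp only [Bool.false_eq_true, if_false]
    obtain ⟨hle, hiff⟩ := pvCountGo sub h s.length s 0 (le_refl _)
    constructor
    · intro h1
      by_contra hni
      have h0 : PySem.Chars.count.go sub s.length s 0 = 0 := hiff.2 hni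
      omega
    · intro hinf
      have h0 : PySem.Chars.count.go sub s.length s 0 ≠ 0 := fun h0 => (hiff.1 h0) hinf
      omega

theorem pvCountStr (x w : String) :
    (decide (1 ≤ PySem.Str.count w x)) = PySem.Str.isIn x w := by
  rw [PySem.Str.count_eq, PySem.Str.isIn_eq]
  by_cases hinf : x.toList <:+: w.toList
  · simp [PySem.Chars.isIn_iff_infix, hinf, (pvCountPos w.toList x.toList).2 hinf]
  · have h1 : ¬ (1 ≤ PySem.Chars.count w.toList x.toList) := fun h => hinf ((pvCountPos _ _).1 h)
    have h2 : PySem.Chars.isIn x.toList w.toList = false := by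
      rw [← Bool.not_eq_true, PySem.Chars.isIn_iff_infix]; exact hinf
    simp [h1, h2]

-- the LHS index of B holds exactly the RHSs of the rules for that LHS
theorem pvIndexGetD (rules : List (String × String)) (a : String) :
    (pvIndex rules).getD a [] = (rules.filter (fun p => p.1 == a)).map (fun p => p.2) := by
  have := PySem.Dict.getD_foldl_modify_append rules PySem.Dict.empty a
  simpa [pvIndex, PySem.Dict.getD_empty] using this

theorem pvMemActive (rules : List (String × String)) (frontier : List String) (w : String) :
    w ∈ pvActive (pvIndex rules) frontier ↔ ∃ a ∈ frontier, (a, w) ∈ rules := by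
  simp only [pvActive, List.mem_flatMap, pvIndexGetD, List.mem_map, List.mem_filter]
  constructor
  · rintro ⟨a, ha, p, ⟨hp, hpa⟩, hpw⟩
    refine ⟨a, ha, ?_⟩
    have : p = (a, w) := by
      cases p
      simp only [beq_iff_eq] at hpa
      simp_all
    rwa [this] at hp
  · rintro ⟨a, ha, hp⟩
    exact ⟨a, ha, (a, w), ⟨hp, by simp⟩, rfl⟩

-- A's comprehension is a filter of its (deduplicated) domain
def pvPredA (rules : List (String × String)) (g : PySem.Set String) (x : String) : Bool :=
  rules.any (fun p => PySem.Set.contains g p.1 && decide (1 ≤ PySem.Str.count p.2 x))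

theorem pvFoldlAddIf (rules : List (String × String)) (g : PySem.Set String) (x : String) :
    ∀ s : PySem.Set String,
      rules.foldl (fun s p => if PySem.Set.contains g p.1 && decide (1 ≤ PySem.Str.count p.2 x) then PySem.Set.add s x else s) s
        = if pvPredA rules g x then PySem.Set.add s x else s := by
  induction rules with
  | nil => intro s; simp [pvPredA]
  | cons r rs ih =>
    intro s
    rw [List.foldl_cons]
    by_cases hc : (PySem.Set.contains g r.1 && decide (1 ≤ PySem.Str.count r.2 x)) = true
    · rw [if_pos hc, ih]
      have hpred : pvPredA (r :: rs) g x = true := by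
        unfold pvPredA
        simp only [List.any_cons]
        rw [hc, Bool.true_or]
      rw [hpred, if_pos rfl]
      by_cases h : pvPredA rs g x = true
      · rw [if_pos h, PySem.Set.add_of_mem ((PySem.Set.mem_add s x x).2 (Or.inr rfl))]
      · rw [if_neg h]
    · rw [if_neg hc, ih]
      have hpred : pvPredA (r :: rs) g x = pvPredA rs g x := by
        unfold pvPredA
        simp only [List.any_cons]
        rw [Bool.not_eq_true] at hc
        rw [hc, Bool.false_or]
      rw [hpred]

theorem pvCompLoop (rules : List (String × String)) (g : PySem.Set String) :
    ∀ (D : List String) (s : PySem.Set String), D.Nodup → (∀ x ∈ D, x ∉ s) →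
      D.foldl (fun s x => rules.foldl
          (fun s p => if PySem.Set.contains g p.1 && decide (1 ≤ PySem.Str.count p.2 x) then PySem.Set.add s x else s) s) s
        = s ++ D.filter (pvPredA rules g) := by
  intro D
  induction D with
  | nil => intro s _ _; simp
  | cons x D ih =>
    intro s hnd hdis
    rw [List.foldl_cons, pvFoldlAddIf]
    have hxs : x ∉ s := hdis x (by simp)
    have hndD : D.Nodup := (List.nodup_cons.1 hnd).2
    have hxD : x ∉ D := (List.nodup_cons.1 hnd).1
    by_cases hp : pvPredA rules g x = true
    · rw [if_pos hp, PySem.Set.add_of_not_mem hxs, ih (s ++ [x]) hndD ?_]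
      · simp [hp]
      · intro y hy
        simp only [List.mem_append, List.mem_singleton]
        rintro (h' | rfl)
        · exact hdis y (List.mem_cons_of_mem _ hy) h'
        · exact hxD hy
    · rw [if_neg hp, ih s hndD (fun y hy => hdis y (List.mem_cons_of_mem _ hy))]
      simp only [List.filter_cons]
      rw [Bool.not_eq_true] at hp
      rw [hp]
      simp

theorem pvNewA_eq (rules : List (String × String)) (g : PySem.Set String) (D : List String) (hD : D.Nodup) :
    pvNewA rules g D = D.filter (pvPredA rules g) := by
  have := pvCompLoop rules g D PySem.Set.empty hD (by intro x _ h; cases h)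
  simpa [pvNewA] using this

-- the two round predicates agree on a candidate, given the frontier invariant
theorem pvPredEq (rules : List (String × String)) (g : PySem.Set String) (frontier : List String) (x : String)
    (hfg : ∀ a ∈ frontier, a ∈ g)
    (hH : ∀ p ∈ rules, p.1 ∈ g → p.1 ∉ frontier → PySem.Str.isIn x p.2 = false) :
    pvPredA rules g x = (pvActive (pvIndex rules) frontier).any (fun w => PySem.Str.isIn x w) := by
  unfold pvPredA
  rw [Bool.eq_iff_iff]
  constructor
  · intro hA
    obtain ⟨p, hp, hc⟩ := List.any_eq_true.1 hA
    simp only [Bool.and_eq_true] at hc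
    obtain ⟨hcg, hcw⟩ := hc
    rw [pvCountStr] at hcw
    have hpg : p.1 ∈ g := (PySem.Set.contains_iff g p.1).1 hcg
    have hpf : p.1 ∈ frontier := by
      by_contra hnf
      rw [hH p hp hpg hnf] at hcw
      cases hcw
    exact List.any_eq_true.2 ⟨p.2, (pvMemActive rules frontier p.2).2 ⟨p.1, hpf, by rw [Prod.mk.eta]; exact hp⟩, hcw⟩
  · intro hB
    obtain ⟨w, hw, hcw⟩ := List.any_eq_true.1 hB
    obtain ⟨a, ha, hr⟩ := (pvMemActive rules frontier w).1 hw
    refine List.any_eq_true.2 ⟨(a, w), hr, ?_⟩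
    show (PySem.Set.contains g a && decide (1 ≤ PySem.Str.count w x)) = true
    rw [Bool.and_eq_true]
    exact ⟨(PySem.Set.contains_iff g a).2 (hfg a ha), by rw [pvCountStr]; exact hcw⟩

-- the main loop correspondence
theorem pvLoops (N T : List String) (rules : List (String × String)) :
    ∀ (n : Nat) (g : PySem.Set String) (frontier : List String),
      (pvNT N T).countP (fun y => !(PySem.Set.contains g y)) = n →
      (∀ a ∈ frontier, a ∈ g) →
      (∀ x ∈ pvNT N T, x ∉ g →
        ∀ p ∈ rules, p.1 ∈ g → p.1 ∉ frontier → PySem.Str.isIn x p.2 = false) →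
      pvLoopA N T rules g = pvLoopB (pvIndex rules) g (pvRem N T g) frontier := by
  intro n
  induction n using Nat.strong_induction_on with
  | _ n ih =>
  intro g frontier hn hfg hH
  have hNTnodup : (pvNT N T).Nodup := PySem.Set.nodup_union _ _ (PySem.Set.nodup_ofList N)
  have hremnodup : (pvRem N T g).Nodup := List.Nodup.filter _ hNTnodup
  have hremg : ∀ x ∈ pvRem N T g, x ∈ pvNT N T ∧ x ∉ g := by
    intro x hx
    obtain ⟨h1, h2⟩ := List.mem_filter.1 hx
    refine ⟨h1, fun hmem => ?_⟩
    rw [(PySem.Set.contains_iff g x).2 hmem] at h2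
    simp at h2
  have hnewA : pvNewA rules g (PySem.Set.diff (PySem.Set.union (PySem.Set.ofList N) T) g)
      = pvNewB (pvIndex rules) frontier (pvRem N T g) := by
    have hdiff : PySem.Set.diff (PySem.Set.union (PySem.Set.ofList N) T) g = pvRem N T g := rfl
    rw [hdiff, pvNewA_eq rules g (pvRem N T g) hremnodup]
    refine List.filter_congr (fun x hx => ?_)
    obtain ⟨hxNT, hxg⟩ := hremg x hx
    exact pvPredEq rules g frontier x hfg (fun p hp hpg hpf => hH x hxNT hxg p hp hpg hpf)
  rw [pvLoopA, hnewA, pvLoopB]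
  by_cases hfr : frontier = []
  · subst hfr
    have hnewnil : pvNewB (pvIndex rules) [] (pvRem N T g) = [] := by
      simp [pvNewB, pvActive]
    rw [hnewnil]
    have hgg : PySem.Set.union g ([] : List String) = g := rfl
    rw [hgg]
    have heq : PySem.Set.equal g g = true := (PySem.Set.equal_iff g g).2 (fun x => Iff.rfl)
    rw [heq, if_pos rfl, if_pos rfl]
  · rw [if_neg hfr]
    by_cases hne : pvNewB (pvIndex rules) frontier (pvRem N T g) = []
    · rw [hne]
      have hgg : PySem.Set.union g ([] : List String) = g := rfl
      have hgg' : PySem.Set.update g ([] : List String) = g := rfl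
      rw [hgg, hgg']
      have heq : PySem.Set.equal g g = true := (PySem.Set.equal_iff g g).2 (fun x => Iff.rfl)
      rw [heq, if_pos rfl, pvLoopB, if_pos rfl]
    · -- a real round: both sides add the same nonempty batch
      obtain ⟨x0, hx0⟩ := List.exists_mem_of_ne_nil _ hne
      have hx0rem : x0 ∈ pvRem N T g := (List.mem_filter.1 hx0).1
      have hdisj : ∀ x ∈ pvNewB (pvIndex rules) frontier (pvRem N T g), x ∉ g :=
        fun x hx => (hremg x (List.mem_filter.1 hx).1).2
      have hguard : PySem.Set.equal g (PySem.Set.union g (pvNewB (pvIndex rules) frontier (pvRem N T g))) = false := by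
        cases hq : PySem.Set.equal g (PySem.Set.union g (pvNewB (pvIndex rules) frontier (pvRem N T g)))
        · rfl
        · exact absurd (((PySem.Set.equal_iff _ _).1 hq x0).2
            ((PySem.Set.mem_union g _ x0).2 (Or.inr hx0))) (hdisj x0 hx0)
      rw [hguard]
      simp only [Bool.false_eq_true, if_false]
      have hupd : PySem.Set.update g (pvNewB (pvIndex rules) frontier (pvRem N T g))
          = PySem.Set.union g (pvNewB (pvIndex rules) frontier (pvRem N T g)) := rfl
      rw [hupd]
      have hg'mem : ∀ y, y ∈ PySem.Set.union g (pvNewB (pvIndex rules) frontier (pvRem N T g))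
          ↔ y ∈ g ∨ y ∈ pvNewB (pvIndex rules) frontier (pvRem N T g) :=
        fun y => PySem.Set.mem_union g _ y
      -- the next `remaining` agrees
      have hrem' : pvRemaining (PySem.Set.union g (pvNewB (pvIndex rules) frontier (pvRem N T g))) (pvRem N T g)
          = pvRem N T (PySem.Set.union g (pvNewB (pvIndex rules) frontier (pvRem N T g))) := by
        unfold pvRemaining pvRem
        rw [List.filter_filter]
        refine List.filter_congr (fun x hx => ?_)
        simp
        exact fun h _ => h
      rw [hrem']
      -- measure decreases
      have hm : (pvNT N T).countP (fun y => !(PySem.Set.contains (PySem.Set.union g (pvNewB (pvIndex rules) frontier (pvRem N T g))) y)) < n := by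
        rw [← hn]
        refine pvCountPLt (pvNT N T) (fun y => !(PySem.Set.contains g y)) _
          (fun y _ hq => ?_) x0 (hremg x0 hx0rem).1 (by simp; exact hdisj x0 hx0) (by simp; exact fun _ => hx0)
        show (!(PySem.Set.contains g y)) = true
        have hq' : (!(PySem.Set.contains (PySem.Set.union g (pvNewB (pvIndex rules) frontier (pvRem N T g))) y)) = true := hq
        cases hc : PySem.Set.contains g y
        · rfl
        · exfalso
          rw [(PySem.Set.contains_iff _ y).2 ((hg'mem y).2 (Or.inl ((PySem.Set.contains_iff g y).1 hc)))] at hq'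
          simp at hq'
      -- frontier invariants for the next round
      have hfg' : ∀ a ∈ pvNewB (pvIndex rules) frontier (pvRem N T g),
          a ∈ PySem.Set.union g (pvNewB (pvIndex rules) frontier (pvRem N T g)) :=
        fun a ha => (hg'mem a).2 (Or.inr ha)
      have hH' : ∀ x ∈ pvNT N T, x ∉ PySem.Set.union g (pvNewB (pvIndex rules) frontier (pvRem N T g)) →
          ∀ p ∈ rules, p.1 ∈ PySem.Set.union g (pvNewB (pvIndex rules) frontier (pvRem N T g)) →
          p.1 ∉ pvNewB (pvIndex rules) frontier (pvRem N T g) → PySem.Str.isIn x p.2 = false := by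
        intro x hxNT hxg' p hp hpg' hpn
        have hxg : x ∉ g := fun h => hxg' ((hg'mem x).2 (Or.inl h))
        have hpg : p.1 ∈ g := by
          rcases (hg'mem p.1).1 hpg' with h | h
          · exact h
          · exact absurd h hpn
        by_cases hpf : p.1 ∈ frontier
        · have hxrem : x ∈ pvRem N T g := by
            have hc : PySem.Set.contains g x = false := by
              cases hc0 : PySem.Set.contains g x
              · rfl
              · exact absurd ((PySem.Set.contains_iff g x).1 hc0) hxg
            exact List.mem_filter.2 ⟨hxNT, by simp; exact hxg⟩
          have hxnew : x ∉ pvNewB (pvIndex rules) frontier (pvRem N T g) :=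
            fun h => hxg' ((hg'mem x).2 (Or.inr h))
          have hact : p.2 ∈ pvActive (pvIndex rules) frontier :=
            (pvMemActive rules frontier p.2).2 ⟨p.1, hpf, by rw [Prod.mk.eta]; exact hp⟩
          cases hib : PySem.Str.isIn x p.2
          · rfl
          · exfalso
            have hmem : x ∈ pvNewB (pvIndex rules) frontier (pvRem N T g) :=
              List.mem_filter.2 ⟨hxrem, List.any_eq_true.2 ⟨p.2, hact, hib⟩⟩
            exact hxnew hmem
        · exact hH x hxNT hxg p hp hpg hpf
      exact ih _ hm (PySem.Set.union g (pvNewB (pvIndex rules) frontier (pvRem N T g)))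
        (pvNewB (pvIndex rules) frontier (pvRem N T g)) rfl hfg' hH'

-- ===== VERDICT (by name: the statement is the Claim_ definition above) =====
theorem collect_generated_py_spec : Claim_equal_collect_generated_py := by
  intro N T rules start _
  unfold Spec_collect_generated_py collect_generated_py collect_generated_py_alt
  have hrem : (PySem.List.dedup (N ++ T)).filter (fun x => !(PySem.Set.contains (PySem.Set.ofList [start]) x))
      = pvRem N T (PySem.Set.ofList [start]) := by
    rw [PySem.List.dedup_eq_ofList, PySem.Set.ofList_append]
    rfl
  rw [hrem]
  exact pvLoops N T rules _ (PySem.Set.ofList [start]) [start] rfl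
    (fun a ha => by rw [PySem.Set.mem_ofList]; exact ha)
    (fun x _ hxg p _ hpg hpf => by
      rw [PySem.Set.mem_ofList] at hpg
      exact absurd hpg hpf)
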